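-- pv_equiv track=rewrite | github.com/chakrib/c4-architecture | backend/app/services/diagram_service.py | _sanitize_mermaid_code
-- ===== SOURCE A (Python) =====
-- def _sanitize_mermaid_code(code: str) -> str:
--     """
--     Sanitize generated Mermaid code to fix common issues.
--     """
--     reserved_words = ['graph', 'subgraph', 'end', 'class', 'classDef', 'click', 'style', 'system', 'application']
--
--     lines = code.split('\n')
--     sanitized_lines = []
--     node_id_map = {}
--
--     for line in lines:
--         sanitized_line = line
--
--         # Fix node IDs that are reserved words
--         for word in reserved_words:
--             if f'{word}[' in sanitized_line.lower() or f'{word}(' in sanitized_line.lower():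
--                 sanitized_line = sanitized_line.replace(f'{word}[', f'node_{word}[')
--                 sanitized_line = sanitized_line.replace(f'{word}(', f'node_{word}(')
--                 node_id_map[word] = f'node_{word}'
--
--         sanitized_lines.append(sanitized_line)
--
--     return '\n'.join(sanitized_lines)
-- ===== SOURCE B (Python) =====
-- def _sanitize_mermaid_code(code: str) -> str:
--     """
--     Sanitize generated Mermaid code to fix common issues.
--     """
--     # Same reserved words; only relative order that matters is kept (e.g. 'graph' before
--     # 'subgraph', whose pattern contains it); 'classDef' is independent of the rest.
--     reserved_words = ['graph', 'subgraph', 'end', 'class', 'click', 'style', 'system',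
--                       'application', 'classDef']
--     for word in reserved_words:
--         code = code.replace(f'{word}[', f'node_{word}[')
--         code = code.replace(f'{word}(', f'node_{word}(')
--     return code
-- ===== Notes on version B (the rewrite author's own statement) =====
-- stated objective: simpler
-- what changed: B drops A's split-into-lines loop, the per-line lowercase membership guard and the never-read node_id_map dict, applying the case-sensitive replaces for each reserved word once over the whole string (with the order-independent 'classDef' moved to the end of the list); as a consequence B also prefixes 'classDef[' / 'classDef(' nodes, which A's guard (mixed-case pattern tested against the lowercased line) can never match.
-- intended difference: On inputs containing 'classDef[' or 'classDef(' A returns them unchanged because its guard compares the mixed-case pattern against the lowercased line and never fires, while B returns them prefixed with 'node_', the intended sanitization since classDef is in A's own reserved_words list. — e.g. on _sanitize_mermaid_code("classDef[DB]"): A returns "classDef[DB]", B returns "node_classDef[DB]"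
import Mathlib
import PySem

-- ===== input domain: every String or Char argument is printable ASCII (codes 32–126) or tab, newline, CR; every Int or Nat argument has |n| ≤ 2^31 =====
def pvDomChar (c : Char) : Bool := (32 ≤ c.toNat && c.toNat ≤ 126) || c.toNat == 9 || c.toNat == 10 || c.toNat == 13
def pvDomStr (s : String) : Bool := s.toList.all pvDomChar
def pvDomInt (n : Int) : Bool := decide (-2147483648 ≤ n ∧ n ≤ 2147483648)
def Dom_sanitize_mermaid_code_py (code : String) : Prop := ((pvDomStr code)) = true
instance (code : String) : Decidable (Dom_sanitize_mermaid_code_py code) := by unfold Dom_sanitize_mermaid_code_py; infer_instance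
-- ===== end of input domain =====

-- B drops A's line-splitting loop and the (never-read) node_id_map, doing the reserved-word
-- replaces once over the whole string; B also fixes A's 'classDef' guard, which compares the
-- mixed-case pattern against the lowercased line and therefore never fires (see D_ below).

-- ===== PORT A =====
-- the reserved_words list (shared literal constant)
def pvWords : List (List Char) :=
  ["graph".toList, "subgraph".toList, "end".toList, "class".toList, "classDef".toList,
   "click".toList, "style".toList, "system".toList, "application".toList]

-- one iteration of A's inner `for word in reserved_words` loop (state: sanitized_line, node_id_map)
def aStep (st : List Char × PySem.Dict (List Char) (List Char)) (word : List Char) :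
    List Char × PySem.Dict (List Char) (List Char) :=
  if PySem.Chars.isIn (word ++ ['[']) (PySem.Chars.lower st.1)
      || PySem.Chars.isIn (word ++ ['(']) (PySem.Chars.lower st.1) then
    (PySem.Chars.replace
        (PySem.Chars.replace st.1 (word ++ ['[']) ("node_".toList ++ word ++ ['[']))
        (word ++ ['(']) ("node_".toList ++ word ++ ['(']),
     st.2.insert word ("node_".toList ++ word))
  else st

def sanitize_mermaid_code_py (code : String) : String :=
  let lines := PySem.Chars.splitOn code.toList ['\n']
  let st := lines.foldl
    (fun (st : List (List Char) × PySem.Dict (List Char) (List Char)) line =>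
      let inner := pvWords.foldl aStep (line, st.2)
      (st.1 ++ [inner.1], inner.2))
    ([], PySem.Dict.empty)
  String.ofList (PySem.Chars.join ['\n'] st.1)

-- ===== PORT B =====
-- B's reserved_words list ('classDef' moved last; only the graph/subgraph relative order matters)
def pvWordsB : List (List Char) :=
  ["graph".toList, "subgraph".toList, "end".toList, "class".toList,
   "click".toList, "style".toList, "system".toList, "application".toList, "classDef".toList]

-- one iteration of B's `for word in reserved_words` loop over the whole code
def bStep (s : List Char) (word : List Char) : List Char :=
  PySem.Chars.replace
    (PySem.Chars.replace s (word ++ ['[']) ("node_".toList ++ word ++ ['[']))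
    (word ++ ['(']) ("node_".toList ++ word ++ ['('])

def sanitize_mermaid_code_py_alt (code : String) : String :=
  String.ofList (pvWordsB.foldl bStep code.toList)

-- ===== PRECONDITION & SPEC =====
-- On inputs containing 'classDef[' or 'classDef(' A returns them unprefixed (its guard checks the
-- mixed-case pattern 'classDef[' against the lowercased line, so it never fires), while B returns
-- them prefixed with 'node_', which is the intended sanitization since classDef is in A's own
-- reserved_words list.
def D_sanitize_mermaid_code_py (code : String) : Prop :=
  PySem.Str.isIn "classDef[" code = true ∨ PySem.Str.isIn "classDef(" code = true
instance (code : String) : Decidable (D_sanitize_mermaid_code_py code) := by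
  unfold D_sanitize_mermaid_code_py; infer_instance

def Spec_sanitize_mermaid_code_py (code : String) (out : String) : Prop :=
  ¬ D_sanitize_mermaid_code_py code → out = sanitize_mermaid_code_py_alt code
instance (code : String) (out : String) : Decidable (Spec_sanitize_mermaid_code_py code out) := by
  unfold Spec_sanitize_mermaid_code_py; infer_instance

def pvDiffWitness_sanitize_mermaid_code_py : String := "classDef[DB]"
def pvDiffWitnessOut_sanitize_mermaid_code_py : String × String := ("classDef[DB]", "node_classDef[DB]")

-- ===== CLAIM (what is proved, stated in full; the proofs are below) =====
def Claim_unchanged_sanitize_mermaid_code_py : Prop :=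
  ∀ (code : String), Dom_sanitize_mermaid_code_py code →
    Spec_sanitize_mermaid_code_py code (sanitize_mermaid_code_py code)
def Claim_changed_sanitize_mermaid_code_py : Prop :=
  Dom_sanitize_mermaid_code_py (pvDiffWitness_sanitize_mermaid_code_py) ∧
  D_sanitize_mermaid_code_py (pvDiffWitness_sanitize_mermaid_code_py) ∧
  sanitize_mermaid_code_py (pvDiffWitness_sanitize_mermaid_code_py) = pvDiffWitnessOut_sanitize_mermaid_code_py.1 ∧
  sanitize_mermaid_code_py_alt (pvDiffWitness_sanitize_mermaid_code_py) = pvDiffWitnessOut_sanitize_mermaid_code_py.2 ∧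
  pvDiffWitnessOut_sanitize_mermaid_code_py.1 ≠ pvDiffWitnessOut_sanitize_mermaid_code_py.2
def Claim_exact_sanitize_mermaid_code_py : Prop :=
  ∀ (code : String), Dom_sanitize_mermaid_code_py code → D_sanitize_mermaid_code_py code →
    sanitize_mermaid_code_py code ≠ sanitize_mermaid_code_py_alt code

-- ===== LEMMAS AND PROOFS =====

def rep (o : Char) (p r : List Char) : List Char → List Char
  | [] => []
  | c :: t =>
    if (o :: p).isPrefixOf (c :: t) then r ++ rep o p r (t.drop p.length)
    else c :: rep o p r t
termination_by l => l.length
decreasing_by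
  · simp only [List.length_drop, List.length_cons]; omega
  · simp only [List.length_cons]; omega

theorem rep_go (o : Char) (p r : List Char) :
    ∀ (fuel : Nat) (l acc : List Char), l.length ≤ fuel →
      PySem.Chars.replace.go (o :: p) r fuel l acc = acc.reverse ++ rep o p r l := by
  intro fuel
  induction fuel with
  | zero =>
    intro l acc h
    have : l = [] := List.eq_nil_of_length_eq_zero (Nat.le_zero.mp h)
    subst this
    simp [PySem.Chars.replace.go, rep]
  | succ n ih =>
    intro l acc h
    cases l with
    | nil => simp [PySem.Chars.replace.go, rep]
    | cons c t =>
      rw [PySem.Chars.replace.go]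
      by_cases hp : (o :: p).isPrefixOf (c :: t)
      · simp only [hp, if_true]
        rw [rep]
        simp only [hp, if_true]
        have hlen : ((c :: t).drop (o :: p).length).length ≤ n := by
          simp only [List.length_drop, List.length_cons] at *
          omega
        rw [ih _ _ hlen]
        simp only [List.length_cons, List.drop_succ_cons, List.reverse_append, List.reverse_reverse]
        simp
      · simp only [hp, if_false]
        rw [rep]
        simp only [hp, if_false]
        have hlen : t.length ≤ n := by simp only [List.length_cons] at h; omega
        rw [ih _ _ hlen]
        simp

theorem replace_eq_rep (o : Char) (p r s : List Char) :
    PySem.Chars.replace s (o :: p) r = rep o p r s := by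
  rw [PySem.Chars.replace]
  simp only [List.isEmpty_cons, if_false, Bool.false_eq_true]
  rw [rep_go o p r s.length s [] (le_refl _)]
  simp

theorem prefix_short {α : Type} {x a b : List α} (h : x <+: a ++ b) (hl : x.length ≤ a.length) :
    x <+: a := by
  have hx : x = (a ++ b).take x.length := List.prefix_iff_eq_take.mp h
  rw [List.take_append_of_le_length hl] at hx
  rw [hx]
  exact List.take_prefix _ _

theorem infix_cons_cases {q X : List Char} {c : Char} (h : q <:+: c :: X) :
    q <+: c :: X ∨ q <:+: X := by
  obtain ⟨u, v, huv⟩ := h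
  cases u with
  | nil => exact Or.inl ⟨v, by simpa using huv⟩
  | cons d u' =>
    right
    refine ⟨u', v, ?_⟩
    have := huv
    simp only [List.cons_append, List.cons.injEq] at this
    exact this.2

theorem infix_append_cases {q w Y : List Char} (h : q <:+: w ++ Y) :
    q <:+: w ∨ q <:+: Y ∨
      ∃ m, 0 < m ∧ m < q.length ∧ q.take m <:+ w ∧ q.drop m <+: Y := by
  obtain ⟨u, v, huv⟩ := h
  by_cases h1 : u.length + q.length ≤ w.length
  · left
    have hw : w = List.take w.length (w ++ Y) := by
      rw [List.take_append_of_le_length (le_refl _), List.take_length]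
    rw [← huv] at hw
    rw [List.append_assoc] at hw
    rw [List.take_append] at hw
    have hu : List.take w.length u = u := List.take_of_length_le (by omega)
    rw [hu, List.take_append] at hw
    have hq : List.take (w.length - u.length) q = q := List.take_of_length_le (by omega)
    rw [hq] at hw
    exact ⟨u, List.take (w.length - u.length - q.length) v, by rw [hw]; simp [List.append_assoc]⟩
  · by_cases h2 : w.length ≤ u.length
    · right; left
      have hY : Y = List.drop w.length (w ++ Y) := by
        rw [List.drop_append_of_le_length (le_refl _)]; simp
      rw [← huv, List.append_assoc, List.drop_append_of_le_length h2] at hY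
      exact ⟨List.drop w.length u, v, by rw [hY, List.append_assoc]⟩
    · right; right
      refine ⟨w.length - u.length, by omega, by omega, ?_, ?_⟩
      · -- q.take m <:+ w ; show w = u ++ q.take m
        have hw : w = List.take w.length (w ++ Y) := by
          rw [List.take_append_of_le_length (le_refl _), List.take_length]
        rw [← huv, List.append_assoc, List.take_append] at hw
        have hu : List.take w.length u = u := List.take_of_length_le (by omega)
        rw [hu, List.take_append_of_le_length (by omega)] at hw
        exact ⟨u, hw.symm⟩
      · -- q.drop m <+: Y
        have hY : Y = List.drop w.length (w ++ Y) := by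
          rw [List.drop_append_of_le_length (le_refl _)]; simp
        rw [← huv, List.append_assoc, List.drop_append] at hY
        have hu : List.drop w.length u = [] := List.drop_eq_nil_of_le (by omega)
        rw [hu, List.nil_append, List.drop_append] at hY
        have hv : List.drop (w.length - u.length - q.length) v = v := by
          have : w.length - u.length - q.length = 0 := by omega
          rw [this, List.drop_zero]
        rw [hv] at hY
        exact ⟨v, hY.symm⟩

theorem rep_noop (o : Char) (p r : List Char) : ∀ {s : List Char}, ¬ (o :: p) <:+: s →
    rep o p r s = s := by
  intro s
  induction s using rep.induct o p with
  | case1 => intro _; simp [rep]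
  | case2 c t hp ih =>
    intro h
    exact absurd ((List.isPrefixOf_iff_prefix.mp hp).isInfix) h
  | case3 c t hp ih =>
    intro h
    rw [rep]
    simp only [hp, Bool.false_eq_true, if_false]
    rw [ih (fun hin => h (List.infix_cons hin))]

theorem prefix_through_nl (pat A t : List Char) (hnl : '\n' ∉ pat) :
    (pat <+: A ++ '\n' :: t) ↔ pat <+: A := by
  constructor
  · intro h
    by_cases hl : pat.length ≤ A.length
    · have hx : pat = (A ++ '\n' :: t).take pat.length := List.prefix_iff_eq_take.mp h
      rw [List.take_append_of_le_length hl] at hx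
      rw [hx]; exact List.take_prefix _ _
    · exfalso
      have hx : pat = (A ++ '\n' :: t).take pat.length := List.prefix_iff_eq_take.mp h
      rw [List.take_append] at hx
      have hA : List.take pat.length A = A := List.take_of_length_le (by omega)
      rw [hA] at hx
      have hpos : 0 < pat.length - A.length := by omega
      have : '\n' ∈ pat := by
        rw [hx]
        apply List.mem_append_right
        cases hk : pat.length - A.length with
        | zero => omega
        | succ k => simp [List.take_succ_cons]
      exact hnl this
  · intro h
    exact h.trans (List.prefix_append _ _)

theorem rep_nl (o : Char) (p r : List Char) (hnl : '\n' ∉ o :: p) :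
    ∀ (s t : List Char), rep o p r (s ++ '\n' :: t) = rep o p r s ++ '\n' :: rep o p r t := by
  intro s
  induction s using rep.induct o p with
  | case1 =>
    intro t
    have hne : ¬ (o :: p).isPrefixOf ('\n' :: t) := by
      intro hp
      rcases List.cons_prefix_cons.mp (List.isPrefixOf_iff_prefix.mp hp) with ⟨ho, _⟩
      exact hnl (ho ▸ List.mem_cons_self)
    simp only [List.nil_append]
    rw [show rep o p r [] = [] from by simp [rep], List.nil_append]
    rw [rep]
    simp [hne]
  | case2 c s' hp ih =>
    intro t
    have hplen : (o :: p).length ≤ (c :: s').length :=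
      (List.isPrefixOf_iff_prefix.mp hp).length_le
    have hp2 : (o :: p).isPrefixOf ((c :: s') ++ '\n' :: t) := by
      rw [List.isPrefixOf_iff_prefix] at *
      exact (prefix_through_nl _ _ _ hnl).mpr hp
    rw [List.cons_append, rep]
    simp only [← List.cons_append, hp2, if_true]
    rw [rep]
    simp only [hp, if_true]
    have hds : (s' ++ '\n' :: t).drop p.length = s'.drop p.length ++ '\n' :: t := by
      rw [List.drop_append_of_le_length (by simpa using hplen)]
    rw [hds, ih t, List.append_assoc]
  | case3 c s' hp ih =>
    intro t
    have hp2 : ¬ (o :: p).isPrefixOf ((c :: s') ++ '\n' :: t) := by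
      rw [List.isPrefixOf_iff_prefix] at *
      rw [prefix_through_nl _ _ _ hnl]
      exact hp
    rw [List.cons_append, rep]
    simp only [← List.cons_append, hp2, if_false]
    rw [rep]
    simp only [hp, if_false]
    rw [ih t]
    simp

theorem rep_no_create (o : Char) (p r q : List Char)
    (hlen : q.length ≤ r.length + 1)
    (h1 : ¬ q <:+: r)
    (h2 : ∀ m, m < q.length → 0 < m → ¬ q.take m <:+ r)
    (h3 : ∀ k, k < q.length → 0 < k → ¬ q.drop k <+: r) :
    ∀ s : List Char,
      (∀ k, 0 < k → q.drop k <+: rep o p r s → q.drop k <+: s) ∧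
      (¬ q <:+: s → ¬ q <:+: rep o p r s) := by
  intro s
  induction s using rep.induct o p with
  | case1 =>
    constructor
    · intro k _ h
      simpa [rep] using h
    · intro h
      simpa [rep] using h
  | case2 c t hp ih =>
    have hrep : rep o p r (c :: t) = r ++ rep o p r (t.drop p.length) := by
      rw [rep]; simp [hp]
    constructor
    · intro k hk hpre
      rw [hrep] at hpre
      by_cases hkq : q.length ≤ k
      · have : q.drop k = [] := List.drop_eq_nil_of_le hkq
        rw [this]; exact List.nil_prefix
      · exfalso
        have hlen2 : (q.drop k).length ≤ r.length := by
          simp only [List.length_drop]; omega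
        exact h3 k (by omega) hk (prefix_short hpre hlen2)
    · intro hs hcon
      rw [hrep] at hcon
      have hdt : ¬ q <:+: t.drop p.length := fun hin =>
        hs (List.infix_cons (hin.trans (List.drop_suffix _ _).isInfix))
      have hX : ¬ q <:+: rep o p r (t.drop p.length) := ih.2 hdt
      rcases infix_append_cases hcon with h | h | ⟨m, hm0, hmq, htake, _⟩
      · exact h1 h
      · exact hX h
      · exact h2 m hmq hm0 htake
  | case3 c t hp ih =>
    have hrep : rep o p r (c :: t) = c :: rep o p r t := by
      rw [rep]; simp [hp]
    constructor
    · intro k hk hpre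
      rw [hrep] at hpre
      by_cases hkq : q.length ≤ k
      · have : q.drop k = [] := List.drop_eq_nil_of_le hkq
        rw [this]; exact List.nil_prefix
      · have hkq' : k < q.length := by omega
        have hd : q.drop k = q[k] :: q.drop (k + 1) := List.drop_eq_getElem_cons hkq'
        rw [hd] at hpre ⊢
        rcases List.cons_prefix_cons.mp hpre with ⟨hc, htail⟩
        have := ih.1 (k + 1) (by omega) htail
        rw [hc]
        exact List.cons_prefix_cons.mpr ⟨rfl, this⟩
    · intro hs hcon
      rw [hrep] at hcon
      have hX : ¬ q <:+: rep o p r t := ih.2 (fun hin => hs (List.infix_cons hin))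
      rcases infix_cons_cases hcon with h | h
      · cases q with
        | nil => exact hs (List.nil_infix)
        | cons q0 q' =>
          rcases List.cons_prefix_cons.mp h with ⟨hc, htail⟩
          have hq' : q' <+: t := ih.1 1 (by omega) htail
          exact hs (List.IsPrefix.isInfix (hc ▸ List.cons_prefix_cons.mpr ⟨rfl, hq'⟩))
      · exact hX h

theorem replace_noop (pat r : List Char) {s : List Char} (hpat : pat ≠ [])
    (h : ¬ pat <:+: s) : PySem.Chars.replace s pat r = s := by
  cases pat with
  | nil => exact absurd rfl hpat
  | cons o p => rw [replace_eq_rep]; exact rep_noop o p r h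

theorem replace_no_create (pat r q : List Char) (hpat : pat ≠ [])
    (hlen : q.length ≤ r.length + 1)
    (h1 : ¬ q <:+: r)
    (h2 : ∀ m, m < q.length → 0 < m → ¬ q.take m <:+ r)
    (h3 : ∀ k, k < q.length → 0 < k → ¬ q.drop k <+: r)
    {s : List Char} (hs : ¬ q <:+: s) : ¬ q <:+: PySem.Chars.replace s pat r := by
  cases pat with
  | nil => exact absurd rfl hpat
  | cons o p =>
    rw [replace_eq_rep]
    exact (rep_no_create o p r q hlen h1 h2 h3 s).2 hs

theorem replace_nl (pat r : List Char) (hpat : pat ≠ []) (hnl : '\n' ∉ pat) (s t : List Char) :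
    PySem.Chars.replace (s ++ '\n' :: t) pat r =
      PySem.Chars.replace s pat r ++ '\n' :: PySem.Chars.replace t pat r := by
  cases pat with
  | nil => exact absurd rfl hpat
  | cons o p =>
    rw [replace_eq_rep, replace_eq_rep, replace_eq_rep]
    exact rep_nl o p r hnl s t

def splitN : List Char → List (List Char)
  | [] => [[]]
  | c :: t => if c = '\n' then [] :: splitN t else (splitN t).modifyHead (c :: ·)

theorem splitN_ne_nil (s : List Char) : splitN s ≠ [] := by
  induction s with
  | nil => simp [splitN]
  | cons c t ih =>
    rw [splitN]
    split
    · simp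
    · cases h : splitN t with
      | nil => exact absurd h ih
      | cons a l => simp [h]

theorem splitN_join (s : List Char) : PySem.Chars.join ['\n'] (splitN s) = s := by
  induction s with
  | nil => simp [splitN, PySem.Chars.join, List.intercalate]
  | cons c t ih =>
    rw [splitN]
    split
    · rename_i hc
      subst hc
      cases h : splitN t with
      | nil => exact absurd h (splitN_ne_nil t)
      | cons a l =>
        rw [PySem.Chars.join_cons_cons]
        rw [h] at ih
        simp [ih]
    · rename_i hc
      cases h : splitN t with
      | nil => exact absurd h (splitN_ne_nil t)
      | cons a l =>
        rw [h] at ih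
        cases l with
        | nil =>
          simp only [List.modifyHead]
          simp only [PySem.Chars.join, List.intercalate] at ih ⊢
          simp at ih ⊢
          simp [ih]
        | cons b l' =>
          simp only [List.modifyHead]
          rw [PySem.Chars.join_cons_cons] at ih ⊢
          simp [← ih]

theorem splitOn_go_eq : ∀ (fuel : Nat) (l cur acc : List Char) (accl : List (List Char)),
    l.length < fuel →
    PySem.Chars.splitOn.go ['\n'] fuel l cur accl
      = accl.reverse ++ (splitN l).modifyHead (cur.reverse ++ ·) := by
  intro fuel
  induction fuel with
  | zero => intro l cur acc accl h; omega
  | succ n ih =>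
    intro l cur acc accl h
    cases l with
    | nil =>
      simp [PySem.Chars.splitOn.go, splitN]
    | cons c t =>
      rw [PySem.Chars.splitOn.go]
      by_cases hc : c = '\n'
      · have hpre : (['\n'] : List Char).isPrefixOf (c :: t) = true := by
          simp [List.isPrefixOf, hc]
        simp only [hpre, if_true]
        rw [show List.drop (['\n'] : List Char).length (c :: t) = t from by simp]
        rw [ih t [] [] (cur.reverse :: accl) (by simp at h ⊢; omega)]
        rw [splitN]
        simp only [hc, if_true]
        cases hs : splitN t with
        | nil => exact absurd hs (splitN_ne_nil t)
        | cons a l =>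
          simp [List.modifyHead]
      · have hpre : (['\n'] : List Char).isPrefixOf (c :: t) = false := by
          simp [List.isPrefixOf]
          exact fun hh => absurd hh.symm hc
        simp only [hpre, Bool.false_eq_true, if_false]
        rw [ih t (c :: cur) [] accl (by simp at h ⊢; omega)]
        rw [splitN]
        simp only [hc, if_false]
        cases hs : splitN t with
        | nil => exact absurd hs (splitN_ne_nil t)
        | cons a l =>
          simp [List.modifyHead]

theorem splitOn_nl (s : List Char) : PySem.Chars.splitOn s ['\n'] = splitN s := by
  rw [PySem.Chars.splitOn]
  rw [splitOn_go_eq (s.length + 1) s [] [] [] (by omega)]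
  simp only [List.reverse_nil, List.nil_append]
  rw [show (fun x : List Char => x) = id from rfl, List.modifyHead_id]
  rfl

theorem lowerChar_ne_D (c : Char) : PySem.Chars.lowerChar c ≠ 'D' := by
  rw [PySem.Chars.lowerChar]
  split
  · rename_i h
    rw [PySem.Chars.isupper] at h
    simp only [Bool.and_eq_true, decide_eq_true_eq] at h
    have h1 : 65 ≤ c.toNat := by
      have := h.1
      rw [Char.le_def] at this
      exact this
    have h2 : c.toNat ≤ 90 := by
      have := h.2
      rw [Char.le_def] at this
      exact this
    intro he
    have hv : (Char.ofNat (c.toNat + 32)).toNat = c.toNat + 32 := by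
      rw [Char.toNat_ofNat]
      have : (c.toNat + 32).isValidChar := Or.inl (by omega)
      simp [this]
    have : ('D' : Char).toNat = 68 := by decide
    rw [he] at hv
    omega
  · rename_i h
    intro he
    rw [he] at h
    exact h (by decide)

theorem isIn_lower_D (pat l : List Char) (hD : 'D' ∈ pat) :
    PySem.Chars.isIn pat (PySem.Chars.lower l) = false := by
  rw [PySem.Chars.isIn_eq_false_iff]
  intro hin
  have hmem : 'D' ∈ PySem.Chars.lower l := hin.subset hD
  rw [PySem.Chars.lower] at hmem
  rcases List.mem_map.mp hmem with ⟨c, _, hc⟩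
  exact lowerChar_ne_D c hc

theorem not_infix_of_isIn_lower_false (pat l : List Char) (hpat : PySem.Chars.lower pat = pat)
    (h : PySem.Chars.isIn pat (PySem.Chars.lower l) = false) : ¬ pat <:+: l := by
  intro hin
  have : PySem.Chars.lower pat <:+: PySem.Chars.lower l := by
    rw [PySem.Chars.lower, PySem.Chars.lower]
    exact hin.map _
  rw [hpat] at this
  exact (PySem.Chars.isIn_eq_false_iff _ _).mp h this

-- the sanitized_line component of aStep
def aStepL (sl : List Char) (word : List Char) : List Char :=
  if PySem.Chars.isIn (word ++ ['[']) (PySem.Chars.lower sl)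
      || PySem.Chars.isIn (word ++ ['(']) (PySem.Chars.lower sl) then
    PySem.Chars.replace
      (PySem.Chars.replace sl (word ++ ['[']) ("node_".toList ++ word ++ ['[']))
      (word ++ ['(']) ("node_".toList ++ word ++ ['('])
  else sl

theorem aStep_fst (st : List Char × PySem.Dict (List Char) (List Char)) (w : List Char) :
    (aStep st w).1 = aStepL st.1 w := by
  rw [aStep, aStepL]
  split
  · rfl
  · rfl

theorem aStepL_eq_bStep (w : List Char) (hw : PySem.Chars.lower w = w) (sl : List Char) :
    aStepL sl w = bStep sl w := by
  rw [aStepL, bStep]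
  split
  · rfl
  · rename_i hg
    simp only [Bool.or_eq_true, not_or, Bool.not_eq_true] at hg
    have hb1 : PySem.Chars.lower (w ++ ['[']) = w ++ ['['] := by
      rw [PySem.Chars.lower] at hw ⊢
      simp [hw, show PySem.Chars.lowerChar '[' = '[' from by decide]
    have hb2 : PySem.Chars.lower (w ++ ['(']) = w ++ ['('] := by
      rw [PySem.Chars.lower] at hw ⊢
      simp [hw, show PySem.Chars.lowerChar '(' = '(' from by decide]
    have hn1 : ¬ (w ++ ['[']) <:+: sl := not_infix_of_isIn_lower_false _ _ hb1 hg.1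
    have hn2 : ¬ (w ++ ['(']) <:+: sl := not_infix_of_isIn_lower_false _ _ hb2 hg.2
    rw [replace_noop _ _ (by simp) hn1, replace_noop _ _ (by simp) hn2]

theorem aStepL_classDef (sl : List Char) : aStepL sl "classDef".toList = sl := by
  rw [aStepL]
  have g : (PySem.Chars.isIn ("classDef".toList ++ ['[']) (PySem.Chars.lower sl)
      || PySem.Chars.isIn ("classDef".toList ++ ['(']) (PySem.Chars.lower sl)) = false := by
    rw [isIn_lower_D _ _ (by decide), isIn_lower_D _ _ (by decide)]
    rfl
  rw [g]
  simp

theorem bStep_classDef_noop (sl : List Char)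
    (h1 : ¬ "classDef[".toList <:+: sl) (h2 : ¬ "classDef(".toList <:+: sl) :
    bStep sl "classDef".toList = sl := by
  rw [bStep]
  rw [show ("classDef".toList ++ ['['] : List Char) = "classDef[".toList from rfl,
      show ("classDef".toList ++ ['('] : List Char) = "classDef(".toList from rfl]
  rw [replace_noop _ _ (by simp) h1, replace_noop _ _ (by simp) h2]

theorem bStep_no_create (w q : List Char)
    (hb1 : q.length ≤ ("node_".toList ++ w ++ ['[']).length + 1)
    (hb2 : q.length ≤ ("node_".toList ++ w ++ ['(']).length + 1)
    (h11 : ¬ q <:+: ("node_".toList ++ w ++ ['[']))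
    (h12 : ¬ q <:+: ("node_".toList ++ w ++ ['(']))
    (h21 : ∀ m, m < q.length → 0 < m → ¬ q.take m <:+ ("node_".toList ++ w ++ ['[']))
    (h22 : ∀ m, m < q.length → 0 < m → ¬ q.take m <:+ ("node_".toList ++ w ++ ['(']))
    (h31 : ∀ k, k < q.length → 0 < k → ¬ q.drop k <+: ("node_".toList ++ w ++ ['[']))
    (h32 : ∀ k, k < q.length → 0 < k → ¬ q.drop k <+: ("node_".toList ++ w ++ ['(']))
    {s : List Char} (hs : ¬ q <:+: s) : ¬ q <:+: bStep s w := by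
  rw [bStep]
  exact replace_no_create _ _ _ (by simp) hb2 h12 h22 h32
    (replace_no_create _ _ _ (by simp) hb1 h11 h21 h31 hs)

theorem line_eq (l : List Char) :
    List.foldl aStepL l pvWords =
      List.foldl bStep l
        ["graph".toList, "subgraph".toList, "end".toList, "class".toList,
         "click".toList, "style".toList, "system".toList, "application".toList] := by
  simp only [pvWords, List.foldl_cons, List.foldl_nil]
  rw [aStepL_eq_bStep "graph".toList (by decide),
      aStepL_eq_bStep "subgraph".toList (by decide),
      aStepL_eq_bStep "end".toList (by decide),
      aStepL_eq_bStep "class".toList (by decide)]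
  rw [aStepL_classDef]
  rw [aStepL_eq_bStep "click".toList (by decide),
      aStepL_eq_bStep "style".toList (by decide),
      aStepL_eq_bStep "system".toList (by decide),
      aStepL_eq_bStep "application".toList (by decide)]

theorem foldl_aStep_fst :
    ∀ (ws : List (List Char)) (l : List Char) (d : PySem.Dict (List Char) (List Char)),
      (List.foldl aStep (l, d) ws).1 = List.foldl aStepL l ws := by
  intro ws
  induction ws with
  | nil => intro l d; rfl
  | cons w ws ih =>
    intro l d
    simp only [List.foldl_cons]
    have : aStep (l, d) w = ((aStep (l, d) w).1, (aStep (l, d) w).2) := rfl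
    rw [this, aStep_fst]
    exact ih _ _

theorem outer_fst :
    ∀ (lines : List (List Char)) (acc : List (List Char)) (d : PySem.Dict (List Char) (List Char)),
      (List.foldl
        (fun (st : List (List Char) × PySem.Dict (List Char) (List Char)) line =>
          let inner := pvWords.foldl aStep (line, st.2)
          (st.1 ++ [inner.1], inner.2)) (acc, d) lines).1
      = acc ++ lines.map (fun l => List.foldl aStepL l pvWords) := by
  intro lines
  induction lines with
  | nil => intro acc d; simp
  | cons line lines ih =>
    intro acc d
    simp only [List.foldl_cons, List.map_cons]
    rw [ih]
    rw [foldl_aStep_fst]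
    simp

theorem bStep_nl (w : List Char) (hnl : '\n' ∉ w) (s t : List Char) :
    bStep (s ++ '\n' :: t) w = bStep s w ++ '\n' :: bStep t w := by
  rw [bStep, bStep, bStep]
  rw [replace_nl _ _ (by simp) (by simp [hnl]) s t]
  rw [replace_nl _ _ (by simp) (by simp [hnl])]

theorem bStep_join (w : List Char) (hnl : '\n' ∉ w) :
    ∀ L : List (List Char),
      bStep (PySem.Chars.join ['\n'] L) w = PySem.Chars.join ['\n'] (L.map (bStep · w)) := by
  intro L
  induction L with
  | nil =>
    rw [show List.map (bStep · w) [] = ([] : List (List Char)) from rfl]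
    rw [show PySem.Chars.join ['\n'] ([] : List (List Char)) = [] from rfl]
    have e1 : PySem.Chars.replace [] (w ++ ['[']) ("node_".toList ++ w ++ ['[']) = [] :=
      replace_noop _ _ (by simp) (by rw [List.infix_nil]; simp)
    rw [bStep, e1]
    exact replace_noop _ _ (by simp) (by rw [List.infix_nil]; simp)
  | cons x L ih =>
    cases L with
    | nil =>
      show bStep (PySem.Chars.join ['\n'] [x]) w = PySem.Chars.join ['\n'] (List.map (bStep · w) [x])
      rw [PySem.Chars.join_singleton, List.map_cons, List.map_nil, PySem.Chars.join_singleton]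
    | cons y L' =>
      simp only [List.map_cons]
      rw [PySem.Chars.join_cons_cons, PySem.Chars.join_cons_cons]
      rw [List.append_assoc, List.singleton_append]
      rw [bStep_nl w hnl]
      rw [ih]
      simp only [List.map_cons]
      rw [List.append_assoc, List.singleton_append]

theorem foldl_bStep_join :
    ∀ (ws : List (List Char)), (∀ w ∈ ws, '\n' ∉ w) →
      ∀ L : List (List Char),
        List.foldl bStep (PySem.Chars.join ['\n'] L) ws
          = PySem.Chars.join ['\n'] (L.map (fun l => List.foldl bStep l ws)) := by
  intro ws
  induction ws with
  | nil => intro _ L; simp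
  | cons w ws ih =>
    intro hnl L
    simp only [List.foldl_cons]
    rw [bStep_join w (hnl w List.mem_cons_self) L]
    rw [ih (fun u hu => hnl u (List.mem_cons_of_mem w hu))]
    rw [List.map_map]
    rfl

theorem rep_len_ge (o : Char) (p r : List Char) (hr : (o :: p).length ≤ r.length) :
    ∀ s : List Char, s.length ≤ (rep o p r s).length := by
  intro s
  induction s using rep.induct o p with
  | case1 => simp [rep]
  | case2 c t hp ih =>
    rw [rep]
    simp only [hp, if_true]
    have hpl : (o :: p).length ≤ (c :: t).length := (List.isPrefixOf_iff_prefix.mp hp).length_le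
    simp only [List.length_append, List.length_cons, List.length_drop] at *
    omega
  | case3 c t hp ih =>
    rw [rep]
    simp only [hp, Bool.false_eq_true, if_false]
    simp only [List.length_cons]
    omega

theorem rep_len_gt (o : Char) (p r : List Char) (hr : (o :: p).length < r.length) :
    ∀ s : List Char, (o :: p) <:+: s → s.length < (rep o p r s).length := by
  intro s
  induction s using rep.induct o p with
  | case1 =>
    intro h
    have := h.length_le
    simp at this
  | case2 c t hp ih =>
    intro _
    rw [rep]
    simp only [hp, if_true]
    have hpl : (o :: p).length ≤ (c :: t).length := (List.isPrefixOf_iff_prefix.mp hp).length_le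
    have hge := rep_len_ge o p r (le_of_lt hr) (t.drop p.length)
    simp only [List.length_append, List.length_cons, List.length_drop] at *
    omega
  | case3 c t hp ih =>
    intro h
    rw [rep]
    simp only [hp, Bool.false_eq_true, if_false]
    rcases infix_cons_cases h with h' | h'
    · exact absurd (List.isPrefixOf_iff_prefix.mpr h') (by simpa using hp)
    · have := ih h'
      simp only [List.length_cons]
      omega

theorem rep_preserve_aux (o : Char) (p r q : List Char)
    (cin : ¬ (o :: p) <:+: q)
    (cso : ∀ i, i < q.length → ¬ q.drop i <+: (o :: p)) :
    ∀ s : List Char, ∀ i, q.drop i <+: s → q.drop i <+: rep o p r s := by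
  intro s
  induction s using rep.induct o p with
  | case1 =>
    intro i h
    have : q.drop i = [] := List.prefix_nil.mp h
    simp [this]
  | case2 c t hp ih =>
    intro i h
    by_cases hq : q.length ≤ i
    · rw [List.drop_eq_nil_of_le hq]
      exact List.nil_prefix
    · exfalso
      have hpp : (o :: p) <+: c :: t := List.isPrefixOf_iff_prefix.mp hp
      by_cases hl : (o :: p).length ≤ (q.drop i).length
      · have : (o :: p) <+: q.drop i := List.prefix_of_prefix_length_le hpp h hl
        exact cin (this.isInfix.trans (List.drop_suffix _ _).isInfix)
      · have : q.drop i <+: (o :: p) := List.prefix_of_prefix_length_le h hpp (by omega)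
        exact cso i (by omega) this
  | case3 c t hp ih =>
    intro i h
    by_cases hq : q.length ≤ i
    · rw [List.drop_eq_nil_of_le hq]
      exact List.nil_prefix
    · have hd : q.drop i = q[i] :: q.drop (i + 1) := List.drop_eq_getElem_cons (by omega)
      rw [hd] at h ⊢
      rcases List.cons_prefix_cons.mp h with ⟨hc, htail⟩
      rw [rep]
      simp only [hp, Bool.false_eq_true, if_false]
      exact List.cons_prefix_cons.mpr ⟨hc, ih (i + 1) htail⟩

theorem rep_preserve (o : Char) (p r q : List Char)
    (cin : ¬ (o :: p) <:+: q)
    (cin2 : ¬ q <:+: (o :: p))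
    (cso : ∀ i, i < q.length → ¬ q.drop i <+: (o :: p))
    (ceo : ∀ j, j < (o :: p).length → 0 < j → ¬ (o :: p).drop j <+: q) :
    ∀ s : List Char, q <:+: s → q <:+: rep o p r s := by
  intro s
  induction s using rep.induct o p with
  | case1 =>
    intro h
    simpa [rep] using h
  | case2 c t hp ih =>
    intro h
    by_cases hq0 : q = []
    · subst hq0; exact List.nil_infix
    · obtain ⟨u, v, huv⟩ := h
      have hpp : (o :: p) <+: c :: t := List.isPrefixOf_iff_prefix.mp hp
      cases u with
      | nil =>
        exfalso
        have hqpre : q <+: c :: t := ⟨v, by simpa using huv⟩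
        by_cases hl : (o :: p).length ≤ q.length
        · exact cin (List.prefix_of_prefix_length_le hpp hqpre hl).isInfix
        · have : q <+: (o :: p) := List.prefix_of_prefix_length_le hqpre hpp (by omega)
          exact cso 0 (List.length_pos_iff.mpr hq0) (by simpa using this)
      | cons d u' =>
        rw [rep]
        simp only [hp, if_true]
        by_cases hl : (o :: p).length ≤ (d :: u').length
        · -- q occurrence lies within the dropped part
          have hdrop : (c :: t).drop (o :: p).length
              = (d :: u').drop (o :: p).length ++ q ++ v := by
            rw [← huv, List.append_assoc, List.drop_append_of_le_length hl, List.append_assoc,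
                ← List.append_assoc]
          have hinf : q <:+: (c :: t).drop (o :: p).length :=
            ⟨(d :: u').drop (o :: p).length, v, hdrop.symm⟩
          have heq : (c :: t).drop (o :: p).length = t.drop p.length := by
            simp [List.length_cons]
          rw [heq] at hinf
          obtain ⟨x, y, hxy⟩ := ih hinf
          exact ⟨r ++ x, y, by rw [← hxy]; simp [List.append_assoc]⟩
        · -- overlap: 0 < |u| < |pat|
          exfalso
          have hu : (d :: u').length < (o :: p).length := by omega
          -- pat = (c::t).take |pat| = u ++ (q++v).take (|pat| - |u|)
          have hpat : (o :: p) = (c :: t).take (o :: p).length :=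
            List.prefix_iff_eq_take.mp hpp
          rw [← huv, List.append_assoc, List.take_append] at hpat
          have hu2 : List.take (o :: p).length (d :: u') = d :: u' :=
            List.take_of_length_le (by omega)
          rw [hu2] at hpat
          -- so pat.drop |u| = (q ++ v).take (|pat| - |u|)
          have hdrop : (o :: p).drop (d :: u').length
              = (q ++ v).take ((o :: p).length - (d :: u').length) := by
            conv_lhs => rw [hpat]
            rw [List.drop_append_of_le_length (le_refl _)]
            simp
          by_cases hlq : (o :: p).length - (d :: u').length ≤ q.length
          · have : (o :: p).drop (d :: u').length <+: q := by
              rw [hdrop, List.take_append_of_le_length hlq]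
              exact List.take_prefix _ _
            exact ceo (d :: u').length (by omega) (by simp) this
          · -- q is a strict infix of pat
            have : q <+: (o :: p).drop (d :: u').length := by
              rw [hdrop, List.take_append]
              have : List.take ((o :: p).length - (d :: u').length) q = q :=
                List.take_of_length_le (by omega)
              rw [this]
              exact List.prefix_append _ _
            exact cin2 (this.isInfix.trans (List.drop_suffix _ _).isInfix)
  | case3 c t hp ih =>
    intro h
    rw [rep]
    simp only [hp, Bool.false_eq_true, if_false]
    obtain ⟨u, v, huv⟩ := h
    cases u with
    | nil =>
      have hqpre : q <+: c :: t := ⟨v, by simpa using huv⟩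
      have := rep_preserve_aux o p r q cin cso (c :: t) 0 (by simpa using hqpre)
      rw [List.drop_zero] at this
      have h2 : q <+: c :: rep o p r t := by
        rw [rep] at this
        simpa only [hp, Bool.false_eq_true, if_false] using this
      exact h2.isInfix
    | cons d u' =>
      have hvt : t = u' ++ q ++ v := by
        have := huv
        simp only [List.cons_append, List.cons.injEq] at this
        exact this.2.symm
      have : q <:+: t := ⟨u', v, hvt.symm⟩
      exact List.infix_cons (ih this)

theorem replace_preserve (pat r q : List Char) (hpat : pat ≠ [])
    (cin : ¬ pat <:+: q) (cin2 : ¬ q <:+: pat)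
    (cso : ∀ i, i < q.length → ¬ q.drop i <+: pat)
    (ceo : ∀ j, j < pat.length → 0 < j → ¬ pat.drop j <+: q)
    {s : List Char} (h : q <:+: s) : q <:+: PySem.Chars.replace s pat r := by
  cases pat with
  | nil => exact absurd rfl hpat
  | cons o p =>
    rw [replace_eq_rep]
    exact rep_preserve o p r q cin cin2 cso ceo s h

theorem replace_len_ge (pat r : List Char) (hpat : pat ≠ [])
    (hr : pat.length ≤ r.length) (s : List Char) :
    s.length ≤ (PySem.Chars.replace s pat r).length := by
  cases pat with
  | nil => exact absurd rfl hpat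
  | cons o p =>
    rw [replace_eq_rep]
    exact rep_len_ge o p r hr s

theorem replace_len_gt (pat r : List Char) (hpat : pat ≠ [])
    (hr : pat.length < r.length) {s : List Char} (h : pat <:+: s) :
    s.length < (PySem.Chars.replace s pat r).length := by
  cases pat with
  | nil => exact absurd rfl hpat
  | cons o p =>
    rw [replace_eq_rep]
    exact rep_len_gt o p r hr s h

theorem bStep_preserve (w q : List Char)
    (c11 : ¬ (w ++ ['[']) <:+: q) (c12 : ¬ q <:+: (w ++ ['[']))
    (c13 : ∀ i, i < q.length → ¬ q.drop i <+: (w ++ ['[']))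
    (c14 : ∀ j, j < (w ++ ['[']).length → 0 < j → ¬ (w ++ ['[']).drop j <+: q)
    (c21 : ¬ (w ++ ['(']) <:+: q) (c22 : ¬ q <:+: (w ++ ['(']))
    (c23 : ∀ i, i < q.length → ¬ q.drop i <+: (w ++ ['(']))
    (c24 : ∀ j, j < (w ++ ['(']).length → 0 < j → ¬ (w ++ ['(']).drop j <+: q)
    {s : List Char} (h : q <:+: s) : q <:+: bStep s w := by
  rw [bStep]
  exact replace_preserve _ _ _ (by simp) c21 c22 c23 c24
    (replace_preserve _ _ _ (by simp) c11 c12 c13 c14 h)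

theorem pres8 (code : String) (q : List Char)
    (hq : q ∈ [("classDef[".toList : List Char), "classDef(".toList])
    (h : q <:+: code.toList) :
    q <:+: List.foldl bStep code.toList
        ["graph".toList, "subgraph".toList, "end".toList, "class".toList,
         "click".toList, "style".toList, "system".toList, "application".toList] := by
  have pr : ∀ (w : List Char), w ∈ [("graph".toList : List Char), "subgraph".toList, "end".toList,
      "class".toList, "click".toList, "style".toList, "system".toList, "application".toList] →
      ∀ {s : List Char}, q <:+: s → q <:+: bStep s w := by
    intro w hww s hs
    fin_cases hww <;> fin_cases hq <;>
      exact bStep_preserve _ _ (by decide) (by decide) (by decide) (by decide)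
        (by decide) (by decide) (by decide) (by decide) hs
  simp only [List.foldl_cons, List.foldl_nil]
  apply pr "application".toList (by simp)
  apply pr "system".toList (by simp)
  apply pr "style".toList (by simp)
  apply pr "click".toList (by simp)
  apply pr "class".toList (by simp)
  apply pr "end".toList (by simp)
  apply pr "subgraph".toList (by simp)
  apply pr "graph".toList (by simp)
  exact h

theorem bStep_classDef_gt {m : List Char}
    (h : ("classDef[".toList : List Char) <:+: m ∨ ("classDef(".toList : List Char) <:+: m) :
    m.length < (bStep m "classDef".toList).length := by
  rw [bStep]
  rcases h with h | h
  · calc m.length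
        < (PySem.Chars.replace m ("classDef".toList ++ ['['])
            ("node_".toList ++ "classDef".toList ++ ['['])).length := by
          apply replace_len_gt _ _ (by simp) (by simp)
          exact h
      _ ≤ _ := replace_len_ge _ _ (by simp) (by simp) _
  · have hpres : ("classDef(".toList : List Char) <:+:
        PySem.Chars.replace m ("classDef".toList ++ ['['])
          ("node_".toList ++ "classDef".toList ++ ['[']) := by
      apply replace_preserve _ _ _ (by simp) (by decide) (by decide) (by decide) (by decide) h
    calc m.length
        ≤ (PySem.Chars.replace m ("classDef".toList ++ ['['])
            ("node_".toList ++ "classDef".toList ++ ['['])).length :=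
          replace_len_ge _ _ (by simp) (by simp) _
      _ < _ := by
          apply replace_len_gt _ _ (by simp) (by simp)
          exact hpres

-- ===== VERDICT (by name: the statement is the Claim_ definition above) =====
theorem chain8_eq (code : String) :
    sanitize_mermaid_code_py code =
      String.ofList (List.foldl bStep code.toList
        ["graph".toList, "subgraph".toList, "end".toList, "class".toList,
         "click".toList, "style".toList, "system".toList, "application".toList]) := by
  simp only [sanitize_mermaid_code_py]
  apply congrArg String.ofList
  rw [outer_fst, List.nil_append, splitOn_nl]
  conv_rhs => rw [← splitN_join code.toList]
  rw [foldl_bStep_join _ (by decide) (splitN code.toList)]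
  apply congrArg (PySem.Chars.join ['\n'])
  apply List.map_congr_left
  intro l _
  exact line_eq l

theorem alt_split (code : String) :
    sanitize_mermaid_code_py_alt code =
      String.ofList (bStep (List.foldl bStep code.toList
        ["graph".toList, "subgraph".toList, "end".toList, "class".toList,
         "click".toList, "style".toList, "system".toList, "application".toList])
        "classDef".toList) := by
  simp only [sanitize_mermaid_code_py_alt, pvWordsB, List.foldl_cons, List.foldl_nil]

theorem nc8 (code : String)
    (hc1 : ¬ ("classDef[".toList : List Char) <:+: code.toList)
    (hc2 : ¬ ("classDef(".toList : List Char) <:+: code.toList) :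
    (¬ ("classDef[".toList : List Char) <:+:
        List.foldl bStep code.toList
          ["graph".toList, "subgraph".toList, "end".toList, "class".toList,
           "click".toList, "style".toList, "system".toList, "application".toList]) ∧
    (¬ ("classDef(".toList : List Char) <:+:
        List.foldl bStep code.toList
          ["graph".toList, "subgraph".toList, "end".toList, "class".toList,
           "click".toList, "style".toList, "system".toList, "application".toList]) := by
  have nc : ∀ (w : List Char), w ∈ [("graph".toList : List Char), "subgraph".toList, "end".toList,
      "class".toList, "click".toList, "style".toList, "system".toList, "application".toList] →
      ∀ (q : List Char), q ∈ [("classDef[".toList : List Char), "classDef(".toList] →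
      ∀ {s : List Char}, ¬ q <:+: s → ¬ q <:+: bStep s w := by
    intro w hww q hq s hs
    fin_cases hww <;> fin_cases hq <;>
      exact bStep_no_create _ _ (by decide) (by decide) (by decide) (by decide)
        (by decide) (by decide) (by decide) (by decide) hs
  simp only [List.foldl_cons, List.foldl_nil]
  constructor
  all_goals
    apply nc "application".toList (by simp) _ (by simp)
    apply nc "system".toList (by simp) _ (by simp)
    apply nc "style".toList (by simp) _ (by simp)
    apply nc "click".toList (by simp) _ (by simp)
    apply nc "class".toList (by simp) _ (by simp)
    apply nc "end".toList (by simp) _ (by simp)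
    apply nc "subgraph".toList (by simp) _ (by simp)
    apply nc "graph".toList (by simp) _ (by simp)
  · exact hc1
  · exact hc2

-- ===== VERDICT (by name: the statement is the Claim_ definition above) =====
theorem sanitize_mermaid_code_py_spec : Claim_unchanged_sanitize_mermaid_code_py := by
  intro code _hdom
  unfold Spec_sanitize_mermaid_code_py
  intro hD
  rw [D_sanitize_mermaid_code_py] at hD
  push_neg at hD
  have hc1 : ¬ ("classDef[".toList : List Char) <:+: code.toList := fun hin =>
    hD.1 ((PySem.Str.isIn_iff_infix _ _).mpr hin)
  have hc2 : ¬ ("classDef(".toList : List Char) <:+: code.toList := fun hin =>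
    hD.2 ((PySem.Str.isIn_iff_infix _ _).mpr hin)
  rw [chain8_eq, alt_split]
  apply congrArg String.ofList
  exact (bStep_classDef_noop _ (nc8 code hc1 hc2).1 (nc8 code hc1 hc2).2).symm

theorem sanitize_mermaid_code_py_changed : Claim_changed_sanitize_mermaid_code_py := by
  unfold Claim_changed_sanitize_mermaid_code_py; decide

theorem sanitize_mermaid_code_py_tight : Claim_exact_sanitize_mermaid_code_py := by
  intro code _hdom hD
  rw [chain8_eq, alt_split]
  intro heq
  have heq' := congrArg String.toList heq
  simp only [String.toList_ofList] at heq'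
  have hin : ("classDef[".toList : List Char) <:+: code.toList ∨
      ("classDef(".toList : List Char) <:+: code.toList := by
    rcases hD with h | h
    · exact Or.inl ((PySem.Str.isIn_iff_infix _ _).mp h)
    · exact Or.inr ((PySem.Str.isIn_iff_infix _ _).mp h)
  have hm : ("classDef[".toList : List Char) <:+:
        List.foldl bStep code.toList
          ["graph".toList, "subgraph".toList, "end".toList, "class".toList,
           "click".toList, "style".toList, "system".toList, "application".toList] ∨
      ("classDef(".toList : List Char) <:+:
        List.foldl bStep code.toList
          ["graph".toList, "subgraph".toList, "end".toList, "class".toList,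
           "click".toList, "style".toList, "system".toList, "application".toList] := by
    rcases hin with h | h
    · exact Or.inl (pres8 code _ (by simp) h)
    · exact Or.inr (pres8 code _ (by simp) h)
  have hlt := bStep_classDef_gt hm
  rw [← heq'] at hlt
  omega
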